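-- pv_equiv track=rewrite | github.com/S1LV3RJ1NX/CodingNinjas-DSA | 01 - Arrays/08 - form_traingle.py | possibleToMakeTriangle
-- ===== SOURCE A (Python) =====
-- def possibleToMakeTriangle(arr):
--     arr.sort()
--     n = len(arr)
--     for i in range(n-2):
--         for j in range(i+1, n-1):
--             for k in range(j+1, n):
--                 if arr[i]+arr[j] > arr[k]:
--                     return True
--                 break
--             break
--
--
--     return False
-- ===== SOURCE B (Python) =====
-- def possibleToMakeTriangle(arr):
--     # Sort in place (same observable mutation as the original), then do an
--     # exhaustive search over all index triples i < j < k; since the array is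
--     # sorted, arr[i] + arr[j] > arr[k] suffices for a triangle.
--     arr.sort()
--     n = len(arr)
--     for i in range(n):
--         for j in range(i + 1, n):
--             for k in range(j + 1, n):
--                 if arr[i] + arr[j] > arr[k]:
--                     return True
--     return False
-- ===== Notes on version B (the rewrite author's own statement) =====
-- stated objective: alternative
-- what changed: A scans only consecutive triples of the sorted array (its nested loops break after one iteration); B does a genuine exhaustive search over all index triples i<j<k of the sorted array, equivalent because any valid triple implies a valid consecutive one in a sorted array.
import Mathlib
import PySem

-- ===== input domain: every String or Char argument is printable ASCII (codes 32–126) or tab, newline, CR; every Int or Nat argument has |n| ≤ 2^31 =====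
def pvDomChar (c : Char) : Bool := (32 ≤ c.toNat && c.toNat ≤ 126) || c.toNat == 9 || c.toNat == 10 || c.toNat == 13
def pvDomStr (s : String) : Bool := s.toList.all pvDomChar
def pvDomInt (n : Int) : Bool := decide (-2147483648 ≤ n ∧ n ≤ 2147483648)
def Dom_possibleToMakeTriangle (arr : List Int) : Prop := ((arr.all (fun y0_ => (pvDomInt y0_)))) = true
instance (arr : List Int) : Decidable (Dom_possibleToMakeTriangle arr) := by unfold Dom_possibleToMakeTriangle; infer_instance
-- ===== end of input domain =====

-- B replaces A's consecutive-triple check (its inner loops break after one pass) by an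
-- exhaustive search over all triples i<j<k of the sorted array — an alternative algorithm,
-- provably equal on every input. Return-value equivalence; both Pythons sort arr in place.

-- ===== PORT A =====
-- A's innermost `for k in range(j+1, n)` runs at most one iteration: its body either
-- returns True or breaks.  `some true` models `return True`; `none` models falling out
-- of the loop (empty range) or `break`.  Indices are always in range here (they come
-- from ranges bounded by len), so `pyGetD _ _ 0` is exact for Python's arr[_].
def pvKLoopA (s : List Int) (i j : Int) : List Int → Option Bool
  | [] => none
  | k :: _ =>
    if PySem.List.pyGetD s i 0 + PySem.List.pyGetD s j 0 > PySem.List.pyGetD s k 0 then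
      some true
    else none

-- A's `for j in range(i+1, n-1)` also runs at most one iteration (unconditional break).
def pvJLoopA (s : List Int) (n i : Int) : List Int → Option Bool
  | [] => none
  | j :: _ => pvKLoopA s i j (PySem.List.pyRange (j + 1) n 1)

-- A's outer `for i in range(n-2)`: continue with the next i unless an inner return fired.
def pvILoopA (s : List Int) (n : Int) : List Int → Bool
  | [] => false
  | i :: rest =>
    match pvJLoopA s n i (PySem.List.pyRange (i + 1) (n - 1) 1) with
    | some b => b
    | none => pvILoopA s n rest

def possibleToMakeTriangle (arr : List Int) : Bool :=
  let s := PySem.List.sorted arr (fun x => x) false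
  let n := PySem.List.len s
  pvILoopA s n (PySem.List.pyRange 0 (n - 2) 1)

-- ===== PORT B =====
-- B's three index loops `for i / for j in range(i+1,n) / for k in range(j+1,n)` walk the
-- sorted list and its tails; ported as the structural recursions over those tails.
def pvKScanB (x y : Int) : List Int → Bool
  | [] => false
  | z :: zs => decide (x + y > z) || pvKScanB x y zs

def pvJScanB (x : Int) : List Int → Bool
  | [] => false
  | y :: ys => pvKScanB x y ys || pvJScanB x ys

def pvIScanB : List Int → Bool
  | [] => false
  | x :: xs => pvJScanB x xs || pvIScanB xs

def possibleToMakeTriangle_alt (arr : List Int) : Bool :=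
  pvIScanB (PySem.List.sorted arr (fun x => x) false)

-- ===== PRECONDITION & SPEC =====
def Spec_possibleToMakeTriangle (arr : List Int) (out : Bool) : Prop := out = possibleToMakeTriangle_alt arr
instance (arr : List Int) (out : Bool) : Decidable (Spec_possibleToMakeTriangle arr out) := by unfold Spec_possibleToMakeTriangle; infer_instance

-- ===== CLAIM (what is proved, stated in full; the proofs are below) =====
def Claim_equal_possibleToMakeTriangle : Prop := ∀ (arr : List Int), Dom_possibleToMakeTriangle arr → Spec_possibleToMakeTriangle arr (possibleToMakeTriangle arr)

-- ===== LEMMAS AND PROOFS =====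

-- B side: each scan is an existential over positions.
theorem pvKScanB_iff (x y : Int) (l : List Int) :
    pvKScanB x y l = true ↔ ∃ k, k < l.length ∧ x + y > l.getD k 0 := by
  induction l with
  | nil => simp [pvKScanB]
  | cons z zs ih =>
    simp only [pvKScanB, Bool.or_eq_true, decide_eq_true_eq, ih]
    constructor
    · rintro (h | ⟨k, hk, h⟩)
      · exact ⟨0, by simp, by simpa using h⟩
      · exact ⟨k + 1, by simpa using hk, by simpa using h⟩
    · rintro ⟨k, hk, h⟩
      cases k with
      | zero => exact Or.inl (by simpa using h)
      | succ k => exact Or.inr ⟨k, by simpa using hk, by simpa using h⟩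

theorem pvJScanB_iff (x : Int) (l : List Int) :
    pvJScanB x l = true ↔
      ∃ j k, j < k ∧ k < l.length ∧ x + l.getD j 0 > l.getD k 0 := by
  induction l with
  | nil => simp [pvJScanB]
  | cons y ys ih =>
    simp only [pvJScanB, Bool.or_eq_true, pvKScanB_iff, ih]
    constructor
    · rintro (⟨k, hk, h⟩ | ⟨j, k, hjk, hk, h⟩)
      · exact ⟨0, k + 1, by omega, by simpa using hk, by simpa using h⟩
      · exact ⟨j + 1, k + 1, by omega, by simpa using hk, by simpa using h⟩
    · rintro ⟨j, k, hjk, hk, h⟩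
      cases j with
      | zero =>
        obtain ⟨k', rfl⟩ : ∃ k', k = k' + 1 := ⟨k - 1, by omega⟩
        exact Or.inl ⟨k', by simpa using hk, by simpa using h⟩
      | succ j =>
        obtain ⟨k', rfl⟩ : ∃ k', k = k' + 1 := ⟨k - 1, by omega⟩
        exact Or.inr ⟨j, k', by omega, by simpa using hk, by simpa using h⟩

theorem pvIScanB_iff (l : List Int) :
    pvIScanB l = true ↔
      ∃ i j k, i < j ∧ j < k ∧ k < l.length ∧ l.getD i 0 + l.getD j 0 > l.getD k 0 := by
  induction l with
  | nil => simp [pvIScanB]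
  | cons x xs ih =>
    simp only [pvIScanB, Bool.or_eq_true, pvJScanB_iff, ih]
    constructor
    · rintro (⟨j, k, hjk, hk, h⟩ | ⟨i, j, k, hij, hjk, hk, h⟩)
      · exact ⟨0, j + 1, k + 1, by omega, by omega, by simpa using hk, by simpa using h⟩
      · exact ⟨i + 1, j + 1, k + 1, by omega, by omega, by simpa using hk, by simpa using h⟩
    · rintro ⟨i, j, k, hij, hjk, hk, h⟩
      cases i with
      | zero =>
        obtain ⟨j', rfl⟩ : ∃ j', j = j' + 1 := ⟨j - 1, by omega⟩
        obtain ⟨k', rfl⟩ : ∃ k', k = k' + 1 := ⟨k - 1, by omega⟩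
        exact Or.inl ⟨j', k', by omega, by simpa using hk, by simpa using h⟩
      | succ i =>
        obtain ⟨j', rfl⟩ : ∃ j', j = j' + 1 := ⟨j - 1, by omega⟩
        obtain ⟨k', rfl⟩ : ∃ k', k = k' + 1 := ⟨k - 1, by omega⟩
        exact Or.inr ⟨i, j', k', by omega, by omega, by simpa using hk, by simpa using h⟩

-- A side: over a list of in-range indices, A's loop (whose inner loops each run at most
-- once) is an existential over consecutive triples.
theorem pvILoopA_on (s : List Int) (is : List Nat) (h : ∀ i ∈ is, i + 2 < s.length) :
    pvILoopA s (s.length : Int) (is.map (fun (i : Nat) => (i : Int))) = true ↔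
      ∃ i ∈ is, s.getD i 0 + s.getD (i + 1) 0 > s.getD (i + 2) 0 := by
  induction is with
  | nil => simp [pvILoopA]
  | cons i rest ih =>
    have hi : i + 2 < s.length := h i (by simp)
    have h1 : (i : Int) + 1 < (s.length : Int) - 1 := by omega
    have h2 : (i : Int) + 1 + 1 < (s.length : Int) := by omega
    have e1 : ((i : Int) + 1) = ((i + 1 : Nat) : Int) := by push_cast; ring
    simp only [List.map_cons, pvILoopA]
    rw [PySem.List.pyRange_one_cons h1]
    simp only [pvJLoopA]
    rw [PySem.List.pyRange_one_cons h2]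
    simp only [pvKLoopA, e1, PySem.List.pyGetD_natCast]
    have e2 : ((i + 1 : Nat) : Int) + 1 = ((i + 2 : Nat) : Int) := by push_cast; ring
    rw [e2, PySem.List.pyGetD_natCast]
    by_cases hc : s.getD i 0 + s.getD (i + 1) 0 > s.getD (i + 2) 0
    · rw [if_pos hc]
      exact iff_of_true rfl ⟨i, List.mem_cons_self, hc⟩
    · rw [if_neg hc]
      show pvILoopA s (s.length : Int) (rest.map (fun (i : Nat) => (i : Int))) = true ↔ _
      rw [ih (fun j hj => h j (by simp [hj]))]
      constructor
      · rintro ⟨j, hj, hcj⟩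
        exact ⟨j, List.mem_cons_of_mem _ hj, hcj⟩
      · rintro ⟨j, hj, hcj⟩
        rcases List.mem_cons.mp hj with rfl | hj
        · exact absurd hcj hc
        · exact ⟨j, hj, hcj⟩

-- a pyRange from 0 is the cast of List.range
theorem pyRange_zero_map (b : Int) :
    PySem.List.pyRange 0 b 1 = (List.range b.toNat).map (fun (k : Nat) => (k : Int)) := by
  rw [PySem.List.pyRange_one]
  simp only [Int.sub_zero, zero_add]

theorem portA_iff (arr : List Int) :
    possibleToMakeTriangle arr = true ↔
      ∃ t, t + 2 < (PySem.List.sorted arr (fun x => x) false).length ∧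
        (PySem.List.sorted arr (fun x => x) false).getD t 0 +
          (PySem.List.sorted arr (fun x => x) false).getD (t + 1) 0 >
          (PySem.List.sorted arr (fun x => x) false).getD (t + 2) 0 := by
  set s := PySem.List.sorted arr (fun x => x) false with hs
  have hmem : ∀ i ∈ List.range ((s.length : Int) - 2).toNat, i + 2 < s.length := by
    intro i hi
    have := List.mem_range.mp hi
    omega
  simp only [possibleToMakeTriangle, ← hs, PySem.List.len_eq, pyRange_zero_map]
  rw [pvILoopA_on s _ hmem]
  constructor
  · rintro ⟨t, ht, hc⟩
    exact ⟨t, by have := List.mem_range.mp ht; omega, hc⟩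
  · rintro ⟨t, ht, hc⟩
    exact ⟨t, List.mem_range.mpr (by omega), hc⟩

-- the bridge: on the sorted array, some triple works iff some consecutive triple works
theorem triple_iff_consec (arr : List Int) :
    (∃ i j k, i < j ∧ j < k ∧ k < (PySem.List.sorted arr (fun x => x) false).length ∧
        (PySem.List.sorted arr (fun x => x) false).getD i 0 +
          (PySem.List.sorted arr (fun x => x) false).getD j 0 >
          (PySem.List.sorted arr (fun x => x) false).getD k 0) ↔
      ∃ t, t + 2 < (PySem.List.sorted arr (fun x => x) false).length ∧
        (PySem.List.sorted arr (fun x => x) false).getD t 0 +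
          (PySem.List.sorted arr (fun x => x) false).getD (t + 1) 0 >
          (PySem.List.sorted arr (fun x => x) false).getD (t + 2) 0 := by
  constructor
  · rintro ⟨i, j, k, hij, hjk, hk, hc⟩
    refine ⟨k - 2, by omega, ?_⟩
    rw [show k - 2 + 1 = k - 1 from by omega, show k - 2 + 2 = k from by omega]
    have m1 : (PySem.List.sorted arr (fun x => x) false).getD i 0 ≤
        (PySem.List.sorted arr (fun x => x) false).getD (k - 2) 0 := by
      rw [List.getD_eq_getElem _ _ (by omega), List.getD_eq_getElem _ _ (by omega)]
      exact PySem.List.sorted_id_getElem_mono arr (by omega) (by omega)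
    have m2 : (PySem.List.sorted arr (fun x => x) false).getD j 0 ≤
        (PySem.List.sorted arr (fun x => x) false).getD (k - 1) 0 := by
      rw [List.getD_eq_getElem _ _ (by omega), List.getD_eq_getElem _ _ (by omega)]
      exact PySem.List.sorted_id_getElem_mono arr (by omega) (by omega)
    omega
  · rintro ⟨t, ht, hc⟩
    exact ⟨t, t + 1, t + 2, by omega, by omega, ht, hc⟩

-- ===== VERDICT (by name: the statement is the Claim_ definition above) =====
theorem possibleToMakeTriangle_spec : Claim_equal_possibleToMakeTriangle := by
  intro arr _
  unfold Spec_possibleToMakeTriangle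
  rw [Bool.eq_iff_iff, portA_iff, ← triple_iff_consec]
  unfold possibleToMakeTriangle_alt
  rw [pvIScanB_iff]
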